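-- pv_equiv track=rewrite | github.com/JoaoVitorBoer/Algorithms-and-Data-Structures | BFS/main.py | cria_matriz
-- ===== SOURCE A (Python) =====
-- def cria_matriz(arquivo):
--
--   vet = []
--   for linha in arquivo:
--     for char in linha:
--       if char != "\n":
--         vet.append(char)
--
--   tamanho_matriz = len(arquivo)
--   matriz = []
--   while vet != []:
--     matriz.append(vet[:tamanho_matriz])
--     vet = vet[tamanho_matriz:]
--
--   return matriz, tamanho_matriz
--
-- vet = ['05','06','07','08','09','10']
-- ===== SOURCE B (Python) =====
-- def cria_matriz(arquivo):
--     tamanho_matriz = len(arquivo)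
--     matriz = []
--     row = []
--     for linha in arquivo:
--         for char in linha:
--             if char != "\n":
--                 row.append(char)
--                 if len(row) == tamanho_matriz:
--                     matriz.append(row)
--                     row = []
--     if row:
--         matriz.append(row)
--     return matriz, tamanho_matriz
-- ===== Notes on version B (the rewrite author's own statement) =====
-- stated objective: simpler
-- what changed: B replaces A's two phases (build a flat char list, then repeatedly slice chunks off its front in a while loop) with one streaming pass that keeps a current-row buffer and flushes it whenever it reaches len(arquivo), so no intermediate flat list or slicing exists.
import Mathlib
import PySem

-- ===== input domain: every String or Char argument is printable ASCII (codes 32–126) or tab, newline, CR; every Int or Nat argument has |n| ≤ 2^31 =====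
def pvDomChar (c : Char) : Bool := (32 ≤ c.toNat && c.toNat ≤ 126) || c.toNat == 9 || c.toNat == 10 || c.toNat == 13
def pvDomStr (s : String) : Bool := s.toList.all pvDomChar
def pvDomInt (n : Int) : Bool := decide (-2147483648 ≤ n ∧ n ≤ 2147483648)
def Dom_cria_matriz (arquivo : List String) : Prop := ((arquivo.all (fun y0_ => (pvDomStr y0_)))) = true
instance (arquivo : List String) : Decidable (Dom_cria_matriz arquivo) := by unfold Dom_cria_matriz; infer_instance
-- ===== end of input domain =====

-- B fuses A's two phases (flatten, then slice) into one streaming pass with a current-row buffer; objective: simpler (no intermediate flat list), same O(total chars) cost.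

-- ===== PORT A =====
-- A's while loop: slice chunks of n off the front of vet.  The `n = 0` guard only
-- makes the recursion total: in A it is unreachable (vet ≠ [] forces arquivo ≠ [], so n ≥ 1).
def criaWhile (n : Nat) (vet : List String) (matriz : List (List String)) : List (List String) :=
  if _h : vet = [] then matriz
  else if _h0 : n = 0 then matriz
  else criaWhile n (vet.drop n) (matriz ++ [vet.take n])
termination_by vet.length
decreasing_by simp only [List.length_drop]; cases vet with
  | nil => exact absurd rfl _h
  | cons a l => simp; omega

def cria_matriz (arquivo : List String) : List (List String) × Int :=
  let vet := arquivo.foldl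
    (fun v linha => linha.toList.foldl
      (fun v ch => if ch != '\n' then v ++ [ch.toString] else v) v) []
  let tamanho_matriz := arquivo.length
  (criaWhile tamanho_matriz vet [], (tamanho_matriz : Int))

-- ===== PORT B =====
-- one streaming step: append the char to the current row; flush the row when full
def altStep (n : Nat) (st : List (List String) × List String) (c : String) :
    List (List String) × List String :=
  let row := st.2 ++ [c]
  if row.length = n then (st.1 ++ [row], []) else (st.1, row)

def cria_matriz_alt (arquivo : List String) : List (List String) × Int :=
  let n := arquivo.length
  let st := arquivo.foldl
    (fun st linha => linha.toList.foldl
      (fun st ch => if ch != '\n' then altStep n st ch.toString else st) st)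
    (([], []) : List (List String) × List String)
  ((if st.2 = [] then st.1 else st.1 ++ [st.2]), (n : Int))

-- ===== PRECONDITION & SPEC =====
def Spec_cria_matriz (arquivo : List String) (out : List (List String) × Int) : Prop := out = cria_matriz_alt arquivo
instance (arquivo : List String) (out : List (List String) × Int) : Decidable (Spec_cria_matriz arquivo out) := by unfold Spec_cria_matriz; infer_instance

-- ===== CLAIM (what is proved, stated in full; the proofs are below) =====
def Claim_equal_cria_matriz : Prop := ∀ (arquivo : List String), Dom_cria_matriz arquivo → Spec_cria_matriz arquivo (cria_matriz arquivo)

-- ===== LEMMAS AND PROOFS =====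

-- the flat list of non-newline chars (as 1-char strings) of one line
def flatLine (l : List Char) : List String :=
  (l.filter (fun ch => ch != '\n')).map (fun ch => ch.toString)

def flatAll (arquivo : List String) : List String :=
  (arquivo.map (fun s => flatLine s.toList)).flatten

-- A's inner char loop appends exactly flatLine
theorem flatLine_foldl (l : List Char) (v : List String) :
    l.foldl (fun v ch => if ch != '\n' then v ++ [ch.toString] else v) v
      = v ++ flatLine l := by
  induction l generalizing v with
  | nil => simp [flatLine]
  | cons a l ih =>
    simp only [List.foldl_cons]
    by_cases h : a = '\n'
    · simpa [flatLine, h] using ih v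
    · rw [ih]; simp [flatLine, h]

-- A's vet equals flatAll arquivo
theorem vet_eq (arquivo : List String) (v : List String) :
    arquivo.foldl
      (fun v linha => linha.toList.foldl
        (fun v ch => if ch != '\n' then v ++ [ch.toString] else v) v) v
      = v ++ flatAll arquivo := by
  induction arquivo generalizing v with
  | nil => simp [flatAll]
  | cons a l ih =>
    simp only [List.foldl_cons]
    rw [flatLine_foldl, ih]
    simp [flatAll]

-- folding a step over a filtered-mapped list = conditional fold over the raw list
theorem foldl_filter_map {σ : Type} (p : Char → Bool) (f : Char → String)
    (step : σ → String → σ) (l : List Char) (st : σ) :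
    ((l.filter p).map f).foldl step st
      = l.foldl (fun st ch => if p ch then step st (f ch) else st) st := by
  induction l generalizing st with
  | nil => rfl
  | cons a l ih =>
    by_cases h : p a <;> simp [h, ih]

-- B's nested fold = fold of altStep over the flat list
theorem alt_fold_eq (n : Nat) (arquivo : List String)
    (st : List (List String) × List String) :
    arquivo.foldl
      (fun st linha => linha.toList.foldl
        (fun st ch => if ch != '\n' then altStep n st ch.toString else st) st) st
      = (flatAll arquivo).foldl (altStep n) st := by
  induction arquivo generalizing st with
  | nil => simp [flatAll]
  | cons a l ih =>
    simp only [List.foldl_cons, ih, flatAll, List.map_cons, List.flatten_cons,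
      List.foldl_append]
    congr 1
    exact (foldl_filter_map (fun ch => ch != '\n') (fun ch => ch.toString)
      (altStep n) a.toList st).symm

theorem criaWhile_chunk (n : Nat) (hn : 0 < n) (row cs : List String)
    (hrow : row.length = n) (acc : List (List String)) :
    criaWhile n (row ++ cs) acc = criaWhile n cs (acc ++ [row]) := by
  rw [criaWhile]
  have hne : row ++ cs ≠ [] := by
    cases row with
    | nil => simp at hrow; omega
    | cons a r => simp
  rw [dif_neg hne, dif_neg (by omega)]
  subst hrow
  simp

-- main invariant: flushing B's fold state equals A's chunking of the pending row ++ rest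
theorem main_lemma (n : Nat) (hn : 0 < n) (cs : List String) :
    ∀ (acc : List (List String)) (row : List String), row.length < n →
    (let st := cs.foldl (altStep n) (acc, row);
      if st.2 = [] then st.1 else st.1 ++ [st.2])
      = criaWhile n (row ++ cs) acc := by
  induction cs with
  | nil =>
    intro acc row hrow
    by_cases h : row = []
    · subst h; simp [criaWhile]
    · simp only [List.foldl_nil, List.append_nil]
      rw [if_neg h, criaWhile, dif_neg h, dif_neg (by omega)]
      rw [List.take_of_length_le (by omega), List.drop_eq_nil_of_le (by omega)]
      simp [criaWhile]
  | cons c cs ih =>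
    intro acc row hrow
    have hstep : (row ++ c :: cs) = (row ++ [c]) ++ cs := by simp
    by_cases h : (row ++ [c]).length = n
    · simp only [List.foldl_cons, altStep, h]
      rw [hstep, criaWhile_chunk n hn _ cs h acc]
      exact ih (acc ++ [row ++ [c]]) [] (by simpa using hn)
    · simp only [List.foldl_cons, altStep, if_neg h]
      rw [hstep]
      have : (row ++ [c]).length < n := by simp at h ⊢; omega
      exact ih acc (row ++ [c]) this

theorem flatAll_nil_of_len_zero (arquivo : List String)
    (h : arquivo.length = 0) : flatAll arquivo = [] := by
  cases arquivo with
  | nil => rfl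
  | cons a l => simp at h

-- ===== VERDICT (by name: the statement is the Claim_ definition above) =====
theorem cria_matriz_spec : Claim_equal_cria_matriz := by
  intro arquivo _
  unfold Spec_cria_matriz cria_matriz cria_matriz_alt
  simp only [vet_eq, List.nil_append, alt_fold_eq]
  by_cases h : arquivo.length = 0
  · rw [flatAll_nil_of_len_zero arquivo h]
    simp [criaWhile]
  · have := main_lemma arquivo.length (by omega) (flatAll arquivo) [] [] (by simpa using Nat.pos_of_ne_zero h)
    simp only [List.nil_append] at this
    simp only [this]
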